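-- pv_equiv track=rewrite | github.com/jaydencoolis/LoongFlow | agents/general_evolve/visualizer/visualizer.py | _build_islands_from_solutions
-- ===== SOURCE A (Python) =====
-- from typing import Any, Dict, List
--
-- def _build_islands_from_solutions(
--     solutions: Dict[str, Dict[str, Any]]
-- ) -> List[List[str]]:
--     """Build islands data by grouping solutions by island_id."""
--     # Group solutions by island_id
--     island_map: Dict[int, List[str]] = {}
--     for solution_id, solution in solutions.items():
--         island_id = solution.get("island_id")
--         if island_id is not None:
--             island_id = int(island_id)
--             if island_id not in island_map:
--                 island_map[island_id] = []
--             island_map[island_id].append(solution_id)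
--
--     # Convert to list format, ensuring all island indices are present
--     if not island_map:
--         return []
--
--     max_island_id = max(island_map.keys())
--     islands: List[List[str]] = []
--     for island_id in range(max_island_id + 1):
--         islands.append(island_map.get(island_id, []))
--
--     return islands
-- ===== SOURCE B (Python) =====
-- from typing import Any, Dict, List
--
-- def _build_islands_from_solutions(
--     solutions: Dict[str, Dict[str, Any]]
-- ) -> List[List[str]]:
--     """Group solution ids by island_id into a preallocated dense list (no intermediate dict)."""
--     # First pass: find the maximum island_id (None if no solution carries one).
--     max_id = None
--     for solution in solutions.values():
--         island_id = solution.get("island_id")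
--         if island_id is not None:
--             island_id = int(island_id)
--             if max_id is None or island_id > max_id:
--                 max_id = island_id
--     if max_id is None:
--         return []
--     # Preallocate (empty when max_id < 0, matching the original's range-based dropping).
--     islands: List[List[str]] = [[] for _ in range(max_id + 1)]
--     # Second pass: append each solution id directly into its island slot.
--     for solution_id, solution in solutions.items():
--         island_id = solution.get("island_id")
--         if island_id is not None:
--             island_id = int(island_id)
--             if 0 <= island_id:
--                 islands[island_id].append(solution_id)
--     return islands
-- ===== Notes on version B (the rewrite author's own statement) =====
-- stated objective: alternative
-- what changed: Replaces the intermediate dict keyed by island_id (plus a range/get pass over it) with a max-tracking first pass and a preallocated dense list of buckets that the second pass appends into directly.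
import Mathlib
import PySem

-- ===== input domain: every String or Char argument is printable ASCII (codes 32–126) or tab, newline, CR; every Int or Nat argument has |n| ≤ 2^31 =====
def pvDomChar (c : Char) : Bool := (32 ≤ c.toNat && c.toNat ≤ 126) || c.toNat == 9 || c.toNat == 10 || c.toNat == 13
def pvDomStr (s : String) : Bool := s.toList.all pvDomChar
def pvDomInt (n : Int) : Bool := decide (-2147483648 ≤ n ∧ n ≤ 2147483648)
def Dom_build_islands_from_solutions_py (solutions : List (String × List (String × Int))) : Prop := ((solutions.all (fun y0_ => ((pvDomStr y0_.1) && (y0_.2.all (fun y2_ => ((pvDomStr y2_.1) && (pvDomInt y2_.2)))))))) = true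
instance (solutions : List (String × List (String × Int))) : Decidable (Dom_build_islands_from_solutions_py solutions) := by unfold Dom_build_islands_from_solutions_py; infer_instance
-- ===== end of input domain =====

-- B (alternative): replaces A's intermediate island_id-keyed dict and range/get pass with a max-tracking first pass and a preallocated dense list the second pass appends into; same cost, different data structure.



-- ===== PORT A =====
-- Port of A: build island_map : Dict Int (List String) by a fold (the Python
-- "if not in map: map[id]=[]; append" pattern is Dict.modify with default []),
-- then map range(max+1) over getD.
def build_islands_from_solutions_py (solutions : List (String × List (String × Int))) : List (List String) :=
  let island_map : PySem.Dict Int (List String) :=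
    solutions.foldl (fun d e =>
      match List.lookup "island_id" e.2 with
      | some island_id => d.modify island_id [] (fun x => x ++ [e.1])
      | none => d) PySem.Dict.empty
  if island_map.size = 0 then []
  else
    match PySem.List.max? island_map.keys id with
    | none => []  -- unreachable guard: island_map is nonempty here
    | some max_island_id =>
      (PySem.List.pyRange 0 (max_island_id + 1)).map (fun island_id => island_map.getD island_id [])

-- ===== PORT B =====
-- Port of B: first pass tracks the maximum island_id; preallocate the dense
-- list; second pass appends each solution id into its slot (List.modify; the
-- out-of-range noop is unreachable since every id is ≤ the maximum).
def build_islands_from_solutions_py_alt (solutions : List (String × List (String × Int))) : List (List String) :=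
  let max_id : Option Int :=
    solutions.foldl (fun m e =>
      match List.lookup "island_id" e.2 with
      | some island_id =>
        match m with
        | none => some island_id
        | some m0 => if island_id > m0 then some island_id else some m0
      | none => m) (none : Option Int)
  match max_id with
  | none => []
  | some mx =>
    let islands0 : List (List String) := (PySem.List.pyRange 0 (mx + 1)).map (fun _ => [])
    solutions.foldl (fun islands e =>
      match List.lookup "island_id" e.2 with
      | some island_id =>
        if 0 ≤ island_id then islands.modify (Int.toNat island_id) (fun x => x ++ [e.1]) else islands
      | none => islands) islands0

-- ===== PRECONDITION & SPEC =====
def Spec_build_islands_from_solutions_py (solutions : List (String × List (String × Int))) (out : List (List String)) : Prop := out = build_islands_from_solutions_py_alt solutions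
instance (solutions : List (String × List (String × Int))) (out : List (List String)) : Decidable (Spec_build_islands_from_solutions_py solutions out) := by unfold Spec_build_islands_from_solutions_py; infer_instance

-- ===== CLAIM (what is proved, stated in full; the proofs are below) =====
def Claim_equal_build_islands_from_solutions_py : Prop := ∀ (solutions : List (String × List (String × Int))), Dom_build_islands_from_solutions_py solutions → Spec_build_islands_from_solutions_py solutions (build_islands_from_solutions_py solutions)


-- ===== LEMMAS AND PROOFS =====
-- the (island_id, solution_id) pairs that both loops act on, in order
def pvPairs (solutions : List (String × List (String × Int))) : List (Int × String) :=
  solutions.filterMap (fun e => (List.lookup "island_id" e.2).map (fun i => (i, e.1)))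

theorem pvFoldA_eq_pairs (s : List (String × List (String × Int)))
    (d : PySem.Dict Int (List String)) :
    s.foldl (fun d e =>
      match List.lookup "island_id" e.2 with
      | some island_id => d.modify island_id [] (fun x => x ++ [e.1])
      | none => d) d
    = (pvPairs s).foldl (fun d p => d.modify p.1 [] (fun x => x ++ [p.2])) d := by
  induction s generalizing d with
  | nil => rfl
  | cons e s ih =>
    simp only [List.foldl_cons, pvPairs, List.filterMap_cons]
    cases h : List.lookup "island_id" e.2 <;> simp [h, ih, pvPairs]

theorem pvFoldB_eq_pairs (s : List (String × List (String × Int)))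
    (isl : List (List String)) :
    s.foldl (fun islands e =>
      match List.lookup "island_id" e.2 with
      | some island_id =>
        if 0 ≤ island_id then islands.modify (Int.toNat island_id) (fun x => x ++ [e.1]) else islands
      | none => islands) isl
    = (pvPairs s).foldl (fun islands p =>
        if 0 ≤ p.1 then islands.modify p.1.toNat (fun x => x ++ [p.2]) else islands) isl := by
  induction s generalizing isl with
  | nil => rfl
  | cons e s ih =>
    simp only [List.foldl_cons, pvPairs, List.filterMap_cons]
    cases h : List.lookup "island_id" e.2 <;> simp [h, ih, pvPairs]

theorem pvFoldM_eq_pairs (s : List (String × List (String × Int))) (m : Option Int) :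
    s.foldl (fun m e =>
      match List.lookup "island_id" e.2 with
      | some island_id =>
        match m, island_id with
        | none, island_id => some island_id
        | some m0, island_id => if island_id > m0 then some island_id else some m0
      | none => m) m
    = ((pvPairs s).map (fun p => p.1)).foldl (fun m i =>
        match m with
        | none => some i
        | some m0 => if i > m0 then some i else some m0) m := by
  induction s generalizing m with
  | nil => rfl
  | cons e s ih =>
    simp only [List.foldl_cons, pvPairs, List.filterMap_cons]
    cases h : List.lookup "island_id" e.2 <;> simp [h, ih, pvPairs]
    cases m <;> rfl

theorem pvIfMax (m0 i : Int) :
    (if i > m0 then some i else some m0) = some (max m0 i) := by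
  rcases lt_or_ge m0 i with h | h
  · simp [h, max_eq_right h.le]
  · simp [not_lt.mpr h, max_eq_left h]

theorem pvFoldM_some (l : List Int) (m0 : Int) :
    l.foldl (fun m i =>
      match m with
      | none => some i
      | some m0 => if i > m0 then some i else some m0) (some m0)
    = some (l.foldl max m0) := by
  induction l generalizing m0 with
  | nil => rfl
  | cons i l ih =>
    simp only [List.foldl_cons]
    rw [pvIfMax, ih]

theorem pvFoldM_max? (l : List Int) :
    l.foldl (fun m i =>
      match m with
      | none => some i
      | some m0 => if i > m0 then some i else some m0) none
    = l.max? := by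
  cases l with
  | nil => rfl
  | cons i l => simpa [List.max?] using pvFoldM_some l i

theorem pvFoldB_getElem? (ps : List (Int × String)) (isl : List (List String)) (j : Nat) :
    (ps.foldl (fun islands p =>
      if 0 ≤ p.1 then islands.modify p.1.toNat (fun x => x ++ [p.2]) else islands) isl)[j]?
    = isl[j]?.map (fun l => l ++ (ps.filter (fun p => p.1 == (j : Int))).map (fun p => p.2)) := by
  induction ps generalizing isl with
  | nil => simp
  | cons p ps ih =>
    simp only [List.foldl_cons, List.filter_cons]
    by_cases h0 : 0 ≤ p.1
    · rw [if_pos h0, ih, List.getElem?_modify]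
      by_cases hj : p.1 = (j : Int)
      · have ht : p.1.toNat = j := by omega
        cases isl[j]? <;> simp [hj]
      · have ht : p.1.toNat ≠ j := by omega
        have hbeq : (p.1 == (j : Int)) = false := by simp [hj]
        cases isl[j]? <;> simp [ht, hbeq]
    · have hbeq : (p.1 == (j : Int)) = false := by simp; omega
      rw [if_neg h0, ih, hbeq]
      simp

-- ===== VERDICT (by name: the statement is the Claim_ definition above) =====
theorem build_islands_from_solutions_py_spec : Claim_equal_build_islands_from_solutions_py := by
  intro s _
  unfold Spec_build_islands_from_solutions_py
  simp only [build_islands_from_solutions_py, build_islands_from_solutions_py_alt]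
  rw [pvFoldA_eq_pairs, pvFoldM_eq_pairs, pvFoldM_max?]
  set P := pvPairs s with hP
  set ids := P.map (fun p => p.1) with hids
  cases hM : ids.max? with
  | none =>
    have hidnil : ids = [] := List.max?_eq_none_iff.mp hM
    have hPnil : P = [] := by
      rw [hids] at hidnil
      exact List.map_eq_nil_iff.mp hidnil
    simp [hPnil]
  | some mx =>
    dsimp only
    rw [pvFoldB_eq_pairs]
    obtain ⟨hmem, hub⟩ := List.max?_eq_some_iff.mp hM
    set D := P.foldl (fun d p => d.modify p.1 [] (fun x => x ++ [p.2])) PySem.Dict.empty with hD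
    have hkeys : D.keys = PySem.Set.ofList ids := by
      have h := PySem.Dict.keys_foldl_modify_key P (fun p : Int × String => p.1)
        ([] : List String) (fun _ p => fun x => x ++ [p.2]) PySem.Dict.empty
      rw [show D.keys = PySem.Set.update ([] : PySem.Set Int) ids from h,
        PySem.Set.update_nil_left]
    have hmxkeys : mx ∈ D.keys := by
      rw [hkeys, PySem.Set.mem_ofList]; exact hmem
    have hkeysne : D.keys ≠ [] := List.ne_nil_of_mem hmxkeys
    have hsz : D.size = D.keys.length := by
      simp [PySem.Dict.size, PySem.Dict.keys]
    have hszne : ¬ D.size = 0 := by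
      rw [hsz]
      simpa [List.length_eq_zero_iff] using hkeysne
    rw [if_neg hszne]
    have hAmax : PySem.List.max? D.keys id = some mx := by
      cases h : PySem.List.max? D.keys id with
      | none => exact absurd ((PySem.List.max?_eq_none_iff _ _).mp h) hkeysne
      | some k =>
        have hk1 : k ∈ ids := by
          have := PySem.List.max?_mem h
          rwa [hkeys, PySem.Set.mem_ofList] at this
        have hk2 : mx ≤ k := PySem.List.max?_isMax h mx hmxkeys
        have : k = mx := le_antisymm (hub k hk1) hk2
        rw [this]
    rw [hAmax]
    dsimp only
    have hrange : PySem.List.pyRange 0 (mx + 1) =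
        List.map (fun k : Nat => (k : Int)) (List.range (mx + 1).toNat) := by
      by_cases h : 0 ≤ mx + 1
      · have h3 := PySem.List.pyRange_zero_natCast (mx + 1).toNat
        rwa [Int.toNat_of_nonneg h] at h3
      · have h1 : ¬ (0 : Int) < mx + 1 := by omega
        have h2 : (mx + 1).toNat = 0 := by omega
        simp [PySem.List.pyRange, h1, h2]
    rw [hrange]
    apply List.ext_getElem?
    intro j
    rw [pvFoldB_getElem?]
    simp only [List.getElem?_map]
    by_cases hj : j < (mx + 1).toNat
    · rw [List.getElem?_range hj]
      have hgd := PySem.Dict.getD_foldl_modify_append P PySem.Dict.empty ((j : Nat) : Int)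
      rw [← hD] at hgd
      have hempty : PySem.Dict.empty.getD ((j : Nat) : Int) ([] : List String) = [] := rfl
      rw [hempty] at hgd
      simp only [Option.map_some]
      rw [hgd, ← hP]
    · have hnone : (List.range (mx + 1).toNat)[j]? = none := by
        simp; omega
      rw [hnone]
      rfl
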